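-- pv_equiv track=rewrite | github.com/sergeylobachev/leetcode | Problems/1004.py | can
-- ===== SOURCE A (Python) =====
-- def can(nums, n, k):
--
--     zeroes = 0
--     l = 0
--     r = n - 1
--     for i in range(n):
--         if nums[i] == 0:
--             zeroes += 1
--     if zeroes <= k:
--         return True
--
--
--
--     while r < len(nums) - 1:
--         if nums[l] == 0:
--             zeroes -= 1
--         l += 1
--         r += 1
--         if nums[r] == 0:
--             zeroes += 1
--         if zeroes <= k:
--             return True
--
--     return False
-- ===== SOURCE B (Python) =====
-- def can(nums, n, k):
--     pre = [0]
--     for x in nums: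
--         pre.append(pre[-1] + (x == 0))
--     return any(pre[i + n] - pre[i] <= k for i in range(len(nums) - n + 1))
-- ===== Notes on version B (the rewrite author's own statement) =====
-- stated objective: simpler
-- what changed: Replaces the seeded sliding-window loop (separate first-window scan plus incremental while-loop updates) with a prefix-sum array of zero counts and a single any() over window starts.
-- outside the precondition, e.g. on can([], -2, 0): A returns True, B raises IndexError; on can([1, 0], -1, -1): A raises IndexError, B returns True
import Mathlib
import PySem

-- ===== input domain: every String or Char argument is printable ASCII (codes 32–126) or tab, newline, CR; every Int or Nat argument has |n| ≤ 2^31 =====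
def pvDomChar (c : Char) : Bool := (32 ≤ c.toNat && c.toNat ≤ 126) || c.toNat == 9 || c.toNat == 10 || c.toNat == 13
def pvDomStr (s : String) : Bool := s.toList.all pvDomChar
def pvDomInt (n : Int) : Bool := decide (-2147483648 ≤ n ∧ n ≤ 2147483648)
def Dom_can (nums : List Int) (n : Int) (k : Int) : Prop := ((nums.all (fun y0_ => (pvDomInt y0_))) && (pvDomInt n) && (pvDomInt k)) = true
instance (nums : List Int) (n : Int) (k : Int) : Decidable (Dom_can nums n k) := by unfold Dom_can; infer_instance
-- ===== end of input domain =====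

-- B replaces A's sliding-window loop by a prefix-count array scanned once; objective: simpler.

-- ===== PORT A =====
-- zeroes accumulated by the `for i in range(n)` scan of the first window
def canInitZeroes (nums : List Int) (n : Int) : Int :=
  (PySem.List.pyRange 0 n 1).foldl
    (fun z i => if (PySem.List.pyGet? nums i).getD 0 == 0 then z + 1 else z) 0

-- the `while r < len(nums) - 1` loop; fuel only guards totality (never exhausted under Pre_)
def canWhile (nums : List Int) (k : Int) : Int → Int → Int → Nat → Bool
  | _, _, _, 0 => false
  | zeroes, l, r, fuel + 1 =>
    if r < (nums.length : Int) - 1 then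
      let z1 := if (PySem.List.pyGet? nums l).getD 0 == 0 then zeroes - 1 else zeroes
      let l1 := l + 1
      let r1 := r + 1
      let z2 := if (PySem.List.pyGet? nums r1).getD 0 == 0 then z1 + 1 else z1
      if z2 ≤ k then true else canWhile nums k z2 l1 r1 fuel
    else false

def can (nums : List Int) (n : Int) (k : Int) : Bool :=
  let zeroes := canInitZeroes nums n
  if zeroes ≤ k then true
  else canWhile nums k zeroes 0 (n - 1) (nums.length + 1)

-- ===== PORT B =====
def can_alt (nums : List Int) (n : Int) (k : Int) : Bool :=
  let pre := nums.foldl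
    (fun pre x => pre ++ [(PySem.List.pyGet? pre (-1)).getD 0 + (if x == 0 then 1 else 0)]) [0]
  (PySem.List.pyRange 0 ((nums.length : Int) - n + 1) 1).any
    (fun i => decide ((PySem.List.pyGet? pre (i + n)).getD 0 - (PySem.List.pyGet? pre i).getD 0 ≤ k))

-- ===== PRECONDITION & SPEC =====
-- Pre_ excludes n > len(nums), where A raises IndexError scanning the first window (B returns False there),
-- and n < 0, where both programs' values/IndexErrors come from accidental negative-index wraparound.
def Pre_can (nums : List Int) (n : Int) (k : Int) : Prop := 0 ≤ n ∧ n ≤ (nums.length : Int)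
instance (nums : List Int) (n : Int) (k : Int) : Decidable (Pre_can nums n k) := by
  unfold Pre_can; infer_instance

def pvWitness_can : List Int × Int × Int := ([0, 1, 0], 2, 1)

def Spec_can (nums : List Int) (n : Int) (k : Int) (out : Bool) : Prop := out = can_alt nums n k
instance (nums : List Int) (n : Int) (k : Int) (out : Bool) : Decidable (Spec_can nums n k out) := by
  unfold Spec_can; infer_instance

-- ===== CLAIM (what is proved, stated in full; the proofs are below) =====
def Claim_equal_can : Prop := ∀ (nums : List Int) (n : Int) (k : Int),
  Dom_can nums n k → Pre_can nums n k → Spec_can nums n k (can nums n k)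

-- ===== LEMMAS AND PROOFS =====

-- zc nums j = number of zeros among the first j elements of nums
def zc (nums : List Int) (j : Nat) : Int := (((nums.take j).countP (fun x => x == 0) : Nat) : Int)

theorem zc_succ (nums : List Int) (j : Nat) (h : j < nums.length) :
    zc nums (j + 1) = zc nums j + (if nums[j] == 0 then 1 else 0) := by
  unfold zc
  rw [List.take_succ, List.countP_append, List.getElem?_eq_getElem h]
  simp only [Option.toList_some, List.countP_singleton]
  by_cases hx : nums[j] = 0 <;> simp [hx] <;> push_cast <;> ring

theorem zc_append_le (l : List Int) (x : Int) (j : Nat) (h : j ≤ l.length) :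
    zc (l ++ [x]) j = zc l j := by
  unfold zc
  rw [List.take_append_of_le_length h]

theorem zc_append_last (l : List Int) (x : Int) :
    zc (l ++ [x]) (l.length + 1) = zc l l.length + (if x == 0 then 1 else 0) := by
  unfold zc
  rw [List.take_of_length_le (by simp)]
  rw [List.countP_append, List.take_of_length_le (le_refl l.length)]
  simp only [List.countP_singleton]
  by_cases hx : x = 0 <;> simp [hx] <;> push_cast <;> ring

-- the prefix array B builds is exactly [zc nums 0, …, zc nums len]
theorem preFold_eq (nums : List Int) :
    nums.foldl
      (fun pre x => pre ++ [(PySem.List.pyGet? pre (-1)).getD 0 + (if x == 0 then 1 else 0)]) [0]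
    = (List.range (nums.length + 1)).map (fun j => zc nums j) := by
  induction nums using List.reverseRecOn with
  | nil => simp [zc]
  | append_singleton l x ih =>
    rw [List.foldl_append, ih]
    have hlast : PySem.List.pyGet? ((List.range (l.length + 1)).map (fun j => zc l j)) (-1)
        = some (zc l l.length) := by
      rw [PySem.List.pyGet?_neg_one]
      rw [List.getLast?_eq_getElem?]
      simp [List.range_succ]
    simp only [List.foldl_cons, List.foldl_nil, hlast, Option.getD_some]
    rw [List.length_append, List.length_singleton, List.range_succ (n := l.length + 1)]
    rw [List.map_append]
    congr 1
    · apply List.map_congr_left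
      intro j hj
      rw [List.mem_range] at hj
      rw [zc_append_le l x j (by omega)]
    · simp [zc_append_last]

-- B is true iff some window [i, i+m) has at most k zeros
theorem can_alt_iff (nums : List Int) (n k : Int) (hn : 0 ≤ n) (hln : n ≤ (nums.length : Int)) :
    can_alt nums n k = true ↔
      ∃ i : Nat, i ≤ nums.length - n.toNat ∧ zc nums (i + n.toNat) - zc nums i ≤ k := by
  have hm : n.toNat ≤ nums.length := by omega
  have hcast : (n.toNat : Int) = n := by omega
  unfold can_alt
  rw [preFold_eq]
  have hb : (nums.length : Int) - n + 1 = ((nums.length - n.toNat + 1 : Nat) : Int) := by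
    push_cast; omega
  rw [hb, PySem.List.pyRange_one]
  simp only [sub_zero, Int.toNat_natCast, List.map_map, List.any_map, List.any_eq_true,
    List.mem_range, Function.comp_apply]
  constructor
  · rintro ⟨i, hi, hp⟩
    refine ⟨i, by omega, ?_⟩
    have h1 : PySem.List.pyGet? ((List.range (nums.length + 1)).map (fun j => zc nums j))
        ((0 : Int) + (i : Int) + n) = some (zc nums (i + n.toNat)) := by
      have : (0 : Int) + (i : Int) + n = ((i + n.toNat : Nat) : Int) := by push_cast; omega
      rw [this, PySem.List.pyGet?_natCast]
      simp [List.getElem?_map, List.getElem?_range, Nat.lt_succ_iff, show i + n.toNat ≤ nums.length by omega]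
    have h2 : PySem.List.pyGet? ((List.range (nums.length + 1)).map (fun j => zc nums j))
        ((0 : Int) + (i : Int)) = some (zc nums i) := by
      have : (0 : Int) + (i : Int) = ((i : Nat) : Int) := by push_cast; ring
      rw [this, PySem.List.pyGet?_natCast]
      simp [List.getElem?_map, List.getElem?_range, Nat.lt_succ_iff, show i ≤ nums.length by omega]
    rw [h1, h2] at hp
    simpa using hp
  · rintro ⟨i, hi, hle⟩
    refine ⟨i, by omega, ?_⟩
    have h1 : PySem.List.pyGet? ((List.range (nums.length + 1)).map (fun j => zc nums j))
        ((0 : Int) + (i : Int) + n) = some (zc nums (i + n.toNat)) := by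
      have : (0 : Int) + (i : Int) + n = ((i + n.toNat : Nat) : Int) := by push_cast; omega
      rw [this, PySem.List.pyGet?_natCast]
      simp [List.getElem?_map, List.getElem?_range, Nat.lt_succ_iff, show i + n.toNat ≤ nums.length by omega]
    have h2 : PySem.List.pyGet? ((List.range (nums.length + 1)).map (fun j => zc nums j))
        ((0 : Int) + (i : Int)) = some (zc nums i) := by
      have : (0 : Int) + (i : Int) = ((i : Nat) : Int) := by push_cast; ring
      rw [this, PySem.List.pyGet?_natCast]
      simp [List.getElem?_map, List.getElem?_range, Nat.lt_succ_iff, show i ≤ nums.length by omega]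
    rw [h1, h2]
    simpa using hle

-- A's initial scan counts the zeros of the first window
theorem canInitZeroes_eq (nums : List Int) (n : Int) (hn : 0 ≤ n) (hln : n ≤ (nums.length : Int)) :
    canInitZeroes nums n = zc nums n.toNat := by
  unfold canInitZeroes
  rw [PySem.List.pyRange_one, List.foldl_map, sub_zero]
  suffices h : ∀ m : Nat, m ≤ nums.length →
      (List.range m).foldl
        (fun (z : Int) (j : Nat) => if (PySem.List.pyGet? nums ((0 : Int) + (j : Int))).getD 0 == 0 then z + 1 else z) 0
      = zc nums m from h n.toNat (by omega)
  intro m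
  induction m with
  | zero => intro _; simp [zc]
  | succ m ih =>
    intro hm
    rw [List.range_succ, List.foldl_append, ih (by omega)]
    have hg : PySem.List.pyGet? nums ((0 : Int) + (m : Int)) = some nums[m] := by
      rw [zero_add, PySem.List.pyGet?_natCast]
      exact List.getElem?_eq_getElem (by omega)
    simp only [List.foldl_cons, List.foldl_nil, hg, Option.getD_some]
    rw [zc_succ nums m (by omega)]
    by_cases hx : nums[m] = 0 <;> simp [hx] <;> exact hx

-- invariant for A's while loop
theorem canWhile_iff (nums : List Int) (k : Int) (m : Nat) (hm : m ≤ nums.length) :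
    ∀ (fuel : Nat) (j : Nat), nums.length - m - j < fuel →
      (canWhile nums k (zc nums (j + m) - zc nums j) (j : Int) ((j : Int) + (m : Int) - 1) fuel = true
        ↔ ∃ i : Nat, j < i ∧ i ≤ nums.length - m ∧ zc nums (i + m) - zc nums i ≤ k) := by
  intro fuel
  induction fuel with
  | zero => intro j h; omega
  | succ fuel ih =>
    intro j hfuel
    rw [canWhile]
    by_cases hcond : ((j : Int) + (m : Int) - 1 < (nums.length : Int) - 1)
    · have hjm : j + m < nums.length := by omega
      have hj : j < nums.length := by omega
      rw [if_pos hcond]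
      have hgl : PySem.List.pyGet? nums (j : Int) = some nums[j] := by
        rw [PySem.List.pyGet?_natCast]
        simp [List.getElem?_eq_getElem hj]
      have hgr : PySem.List.pyGet? nums ((j : Int) + (m : Int) - 1 + 1) = some nums[j + m] := by
        have : (j : Int) + (m : Int) - 1 + 1 = ((j + m : Nat) : Int) := by push_cast; ring
        rw [this, PySem.List.pyGet?_natCast]
        simp [List.getElem?_eq_getElem hjm]
      simp only [hgl, hgr, Option.getD_some]
      have hz : (if nums[j + m] == 0 then
            (if nums[j] == 0 then zc nums (j + m) - zc nums j - 1 else zc nums (j + m) - zc nums j) + 1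
          else
            (if nums[j] == 0 then zc nums (j + m) - zc nums j - 1 else zc nums (j + m) - zc nums j))
          = zc nums (j + 1 + m) - zc nums (j + 1) := by
        have e1 := zc_succ nums j hj
        have e2 := zc_succ nums (j + m) hjm
        have : j + m + 1 = j + 1 + m := by omega
        rw [this] at e2
        rw [e1, e2]
        split_ifs <;> simp_all <;> ring
      rw [hz]
      by_cases hk : zc nums (j + 1 + m) - zc nums (j + 1) ≤ k
      · rw [if_pos hk]
        simp only [true_iff]
        exact ⟨j + 1, by omega, by omega, hk⟩
      · rw [if_neg hk]
        have hrec := ih (j + 1) (by omega)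
        have harg : ((j : Int) + 1) = ((j + 1 : Nat) : Int) := by push_cast; ring
        have harg2 : ((j : Int) + (m : Int) - 1 + 1) = ((j + 1 : Nat) : Int) + (m : Int) - 1 := by
          push_cast; ring
        rw [harg, harg2, hrec]
        constructor
        · rintro ⟨i, h1, h2, h3⟩; exact ⟨i, by omega, h2, h3⟩
        · rintro ⟨i, h1, h2, h3⟩
          refine ⟨i, ?_, h2, h3⟩
          rcases Nat.lt_or_ge (j + 1) i with h | h
          · exact h
          · have : i = j + 1 := by omega
            rw [this] at h3; exact absurd h3 hk
    · rw [if_neg hcond]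
      constructor
      · intro h; exact absurd h (by simp)
      · rintro ⟨i, h1, h2, _⟩
        exfalso; omega

-- A is true iff some window [i, i+m) has at most k zeros
theorem can_iff (nums : List Int) (n k : Int) (hn : 0 ≤ n) (hln : n ≤ (nums.length : Int)) :
    can nums n k = true ↔
      ∃ i : Nat, i ≤ nums.length - n.toNat ∧ zc nums (i + n.toNat) - zc nums i ≤ k := by
  have hm : n.toNat ≤ nums.length := by omega
  have hz0 : zc nums 0 = 0 := by simp [zc]
  unfold can
  rw [canInitZeroes_eq nums n hn hln]
  by_cases h0 : zc nums n.toNat ≤ k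
  · rw [if_pos h0]
    simp only [true_iff]
    exact ⟨0, by omega, by rw [hz0, Nat.zero_add]; omega⟩
  · rw [if_neg h0]
    have hw := canWhile_iff nums k n.toNat hm (nums.length + 1) 0 (by omega)
    have e0 : zc nums (0 + n.toNat) - zc nums 0 = zc nums n.toNat := by
      rw [hz0, Nat.zero_add]; ring
    rw [e0] at hw
    have e2 : ((0 : Nat) : Int) + (n.toNat : Int) - 1 = n - 1 := by
      rw [Nat.cast_zero, Int.toNat_of_nonneg hn]; ring
    rw [e2, Nat.cast_zero] at hw
    rw [hw]
    constructor
    · rintro ⟨i, _, h2, h3⟩; exact ⟨i, h2, h3⟩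
    · rintro ⟨i, h2, h3⟩
      rcases Nat.eq_zero_or_pos i with h | h
      · subst h; rw [hz0, Nat.zero_add] at h3; omega
      · exact ⟨i, h, h2, h3⟩

-- ===== VERDICT (by name: the statement is the Claim_ definition above) =====
theorem can_spec : Claim_equal_can := by
  intro nums n k _ hpre
  obtain ⟨hn, hln⟩ := hpre
  unfold Spec_can
  have ha := can_iff nums n k hn hln
  have hb := can_alt_iff nums n k hn hln
  exact Bool.eq_iff_iff.mpr (ha.trans hb.symm)
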